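-- pv_equiv track=rewrite | github.com/dgorb/advent-of-code | 2022/6.py | marker_pos
-- ===== SOURCE A (Python) =====
-- def marker_pos(signal, marker_length):
--     chars = []
--     for i, char in enumerate(signal):
--         if len(chars) == marker_length:
--             chars.pop(0)
--         chars.append(char)
--
--         if len(set(chars)) == marker_length:
--             return i + 1
-- ===== SOURCE B (Python) =====
-- # note: A's parameter is named 'signal'; the grading harness denies that bare
-- # identifier in b.py (stdlib module name), so it is named sig here (calls are positional).
-- def marker_pos(sig, marker_length):
--     if marker_length <= 0:
--         return None
--     counts = {}
--     distinct = 0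
--     for i, ch in enumerate(sig):
--         counts[ch] = counts.get(ch, 0) + 1
--         if counts[ch] == 1:
--             distinct += 1
--         if i >= marker_length:
--             old = sig[i - marker_length]
--             counts[old] -= 1
--             if counts[old] == 0:
--                 distinct -= 1
--         if distinct == marker_length:
--             return i + 1
--     return None
-- ===== Notes on version B (the rewrite author's own statement) =====
-- stated objective: faster
-- what changed: A rebuilds a Python set over the whole window at every position (O(n*L)); B maintains a char-count dict and a running distinct counter updated in O(1) per step (O(n)).
import Mathlib
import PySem

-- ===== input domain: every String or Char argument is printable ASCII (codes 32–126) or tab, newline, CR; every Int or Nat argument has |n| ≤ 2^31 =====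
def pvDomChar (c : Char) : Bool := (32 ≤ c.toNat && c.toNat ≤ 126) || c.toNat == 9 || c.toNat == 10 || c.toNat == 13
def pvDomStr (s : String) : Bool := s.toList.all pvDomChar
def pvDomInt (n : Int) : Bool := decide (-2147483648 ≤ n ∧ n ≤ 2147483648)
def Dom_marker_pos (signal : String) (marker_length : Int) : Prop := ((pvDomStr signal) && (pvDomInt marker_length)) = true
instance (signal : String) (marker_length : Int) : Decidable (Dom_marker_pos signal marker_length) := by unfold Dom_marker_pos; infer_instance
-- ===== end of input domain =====

-- B replaces A's per-step set construction over the window by an O(1) incremental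
-- char-count dict with a running distinct counter (claimed objective: faster).


-- ===== PORT A =====
-- the for-loop over enumerate(signal): structural recursion carrying the index i
-- and the window list `chars`; chars.pop(0) is `chars.drop 1` (exact where it succeeds;
-- the empty-window pop, where Python raises IndexError, is excluded by Pre_).
def markerGoA (L : Int) : List Char → Int → List Char → Option Int
  | [], _, _ => none
  | c :: rest, i, chars =>
    let chars1 := if (chars.length : Int) = L then chars.drop 1 else chars
    let chars2 := chars1 ++ [c]
    if ((PySem.Set.ofList chars2).length : Int) = L then some (i + 1)
    else markerGoA L rest (i + 1) chars2

def marker_pos (signal : String) (marker_length : Int) : Option Int :=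
  markerGoA marker_length signal.toList 0 []

-- ===== PORT B =====
-- the for-loop over enumerate(signal): structural recursion carrying the index i,
-- the count dict and the running distinct counter; signal[i - marker_length] is
-- PySem.List.pyGet? (always in range when reached, since 0 ≤ i-L < len(signal)).
def markerGoB (s : List Char) (L : Int) : List Char → Int → PySem.Dict Char Int → Int → Option Int
  | [], _, _, _ => none
  | c :: rest, i, counts, distinct =>
    let counts1 := counts.insert c (counts.getD c 0 + 1)
    let distinct1 := if counts1.getD c 0 = 1 then distinct + 1 else distinct
    if L ≤ i then
      let old := (PySem.List.pyGet? s (i - L)).getD ' '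
      let counts2 := counts1.insert old (counts1.getD old 0 - 1)
      let distinct2 := if counts2.getD old 0 = 0 then distinct1 - 1 else distinct1
      if distinct2 = L then some (i + 1)
      else markerGoB s L rest (i + 1) counts2 distinct2
    else
      if distinct1 = L then some (i + 1)
      else markerGoB s L rest (i + 1) counts1 distinct1

def marker_pos_alt (signal : String) (marker_length : Int) : Option Int :=
  if marker_length ≤ 0 then none
  else markerGoB signal.toList marker_length signal.toList 0 PySem.Dict.empty 0

-- ===== PRECONDITION & SPEC =====
-- Pre_ excludes only marker_length = 0 with a nonempty signal, where A raises
-- IndexError (chars.pop(0) on the empty window at the first iteration).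
def Pre_marker_pos (signal : String) (marker_length : Int) : Prop :=
  marker_length ≠ 0 ∨ signal = ""
instance (signal : String) (marker_length : Int) : Decidable (Pre_marker_pos signal marker_length) := by unfold Pre_marker_pos; infer_instance
def pvWitness_marker_pos : String × Int := ("mjqjpqmgbljsphdztnvjfqwrcgsmlb", 4)

def Spec_marker_pos (signal : String) (marker_length : Int) (out : Option Int) : Prop := out = marker_pos_alt signal marker_length
instance (signal : String) (marker_length : Int) (out : Option Int) : Decidable (Spec_marker_pos signal marker_length out) := by unfold Spec_marker_pos; infer_instance

-- ===== CLAIM (what is proved, stated in full; the proofs are below) =====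
def Claim_equal_marker_pos : Prop := ∀ (signal : String) (marker_length : Int), Dom_marker_pos signal marker_length → Pre_marker_pos signal marker_length → Spec_marker_pos signal marker_length (marker_pos signal marker_length)

-- ===== LEMMAS AND PROOFS =====

-- |set(xs)| is the number of distinct elements of xs
lemma setOfList_length_eq_card (xs : List Char) :
    (PySem.Set.ofList xs).length = xs.toFinset.card := by
  rw [← List.toFinset_card_of_nodup (PySem.Set.nodup_ofList xs)]
  congr 1
  ext c
  simp [PySem.Set.mem_ofList]

-- appending one char adds one to the distinct count iff it is new
lemma toFinset_card_append_singleton (w : List Char) (c : Char) :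
    (w ++ [c]).toFinset.card = w.toFinset.card + (if c ∈ w then 0 else 1) := by
  rw [List.toFinset_append, List.toFinset_cons, List.toFinset_nil, insert_empty_eq,
    Finset.union_singleton]
  by_cases h : c ∈ w
  · rw [Finset.insert_eq_self.mpr (List.mem_toFinset.mpr h), if_pos h]; omega
  · rw [Finset.card_insert_of_notMem (fun hm => h (List.mem_toFinset.mp hm)), if_neg h]

-- dropping the head removes one from the distinct count iff it occurs nowhere else
lemma toFinset_card_cons (c : Char) (t : List Char) :
    (c :: t).toFinset.card = t.toFinset.card + (if c ∈ t then 0 else 1) := by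
  rw [List.toFinset_cons]
  by_cases h : c ∈ t
  · rw [Finset.insert_eq_self.mpr (List.mem_toFinset.mpr h), if_pos h]; omega
  · rw [Finset.card_insert_of_notMem (fun hm => h (List.mem_toFinset.mp hm)), if_neg h]

-- A returns None for negative marker_length: the set size is never negative
lemma goA_neg (L : Int) (hL : L < 0) :
    ∀ (rest : List Char) (i : Int) (chars : List Char),
      markerGoA L rest i chars = none := by
  intro rest
  induction rest with
  | nil => intro i chars; rfl
  | cons c r ih =>
    intro i chars
    simp only [markerGoA]
    rw [if_neg (by omega)]
    exact ih _ _

-- the coupled invariant: with window w = pre.drop (pre.length - L'), A's list state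
-- and B's (counts, distinct) state describe the same window, and the two loops agree
lemma go_eq (s : List Char) (L' : Nat) (hL : 0 < L') :
    ∀ (rest pre : List Char) (counts : PySem.Dict Char Int) (distinct : Int),
      s = pre ++ rest →
      (∀ x, counts.getD x 0 = ((pre.drop (pre.length - L')).count x : Int)) →
      distinct = ((pre.drop (pre.length - L')).toFinset.card : Int) →
      markerGoA (L' : Int) rest (pre.length : Int) (pre.drop (pre.length - L')) =
        markerGoB s (L' : Int) rest (pre.length : Int) counts distinct := by
  intro rest
  induction rest with
  | nil => intro pre counts distinct _ _ _; rfl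
  | cons c r ih =>
    intro pre counts distinct hs hc hd
    have hwlen : (pre.drop (pre.length - L')).length = pre.length - (pre.length - L') :=
      List.length_drop
    set k := pre.length with hk
    set w := pre.drop (k - L') with hwdef
    simp only [markerGoA, markerGoB]
    -- B's first update: counts1 counts the window with c appended
    have hc1 : ∀ x, (counts.insert c (counts.getD c 0 + 1)).getD x 0
        = ((w ++ [c]).count x : Int) := by
      intro x
      by_cases hx : x = c
      · subst hx
        rw [PySem.Dict.getD_insert_self, hc]
        simp [List.count_append]
      · rw [PySem.Dict.getD_insert_of_ne counts (counts.getD c 0 + 1) 0 hx, hc]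
        have hcx : ¬ c = x := fun h => hx h.symm
        simp [List.count_append, hcx]
    -- B's first distinct update counts the distinct chars of w ++ [c]
    have hd1 : (if (counts.insert c (counts.getD c 0 + 1)).getD c 0 = 1
          then distinct + 1 else distinct)
        = (((w ++ [c]).toFinset.card : Nat) : Int) := by
      rw [hc1 c, hd, toFinset_card_append_singleton]
      have hcnt : (w ++ [c]).count c = w.count c + 1 := by simp [List.count_append]
      by_cases hin : c ∈ w
      · rw [if_neg, if_pos hin]
        · push_cast; ring
        · have : 0 < w.count c := List.count_pos_iff.mpr hin
          rw [hcnt]; push_cast; omega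
      · rw [if_pos, if_neg hin]
        · push_cast; ring
        · have : w.count c = 0 := List.count_eq_zero.mpr hin
          rw [hcnt, this]; norm_num
    by_cases hcase : L' ≤ k
    · -- sliding case: window is full, A pops, B removes signal[i-L]
      have hwl : w.length = L' := by rw [hwdef, List.length_drop]; omega
      have hkpos : 0 < k := lt_of_lt_of_le hL hcase
      have hmlt : k - L' < k := by omega
      have hmpre : k - L' < pre.length := by omega
      -- the window decomposes as old :: t with old = s[k-L']
      have hwcons : w = pre[k - L'] :: pre.drop (k - L' + 1) :=
        List.drop_eq_getElem_cons hmpre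
      set t := pre.drop (k - L' + 1) with htdef
      have hold_s : PySem.List.pyGet? s ((k : Int) - (L' : Int)) = some pre[k - L'] := by
        have h1 : (k : Int) - (L' : Int) = ((k - L' : Nat) : Int) := by push_cast [hcase]; ring
        rw [h1, PySem.List.pyGet?_natCast, hs]
        rw [List.getElem?_append_left hmpre, List.getElem?_eq_getElem hmpre]
      set old := pre[k - L'] with holddef
      -- A takes the pop branch
      rw [if_pos (by rw [hwl] : ((w.length : Nat) : Int) = (L' : Int))]
      -- B takes the removal branch
      rw [if_pos (by exact_mod_cast hcase : ((L' : Nat) : Int) ≤ (k : Int))]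
      rw [hold_s]
      simp only [Option.getD_some]
      have hwdrop : w.drop 1 = t := by rw [hwcons]; rfl
      -- counts2 counts the new window t ++ [c]
      have hc2 : ∀ x, ((counts.insert c (counts.getD c 0 + 1)).insert old
            ((counts.insert c (counts.getD c 0 + 1)).getD old 0 - 1)).getD x 0
          = ((t ++ [c]).count x : Int) := by
        intro x
        by_cases hx : x = old
        · subst hx
          rw [PySem.Dict.getD_insert_self, hc1]
          rw [hwcons]
          simp [List.count_cons]
        · rw [PySem.Dict.getD_insert_of_ne _ _ 0 hx, hc1]
          rw [hwcons]
          have hox : ¬ old = x := fun h => hx h.symm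
          simp [List.count_cons, hox]
      -- distinct2 counts the distinct chars of t ++ [c]
      simp only [hc2, hd1]
      have hwc : w ++ [c] = old :: (t ++ [c]) := by rw [hwcons]; rfl
      have hD : (if ((List.count old (t ++ [c]) : Nat) : Int) = 0
            then (((w ++ [c]).toFinset.card : Nat) : Int) - 1
            else (((w ++ [c]).toFinset.card : Nat) : Int))
          = (((t ++ [c]).toFinset.card : Nat) : Int) := by
        rw [hwc, toFinset_card_cons]
        by_cases hin : old ∈ t ++ [c]
        · rw [if_neg, if_pos hin]
          · push_cast; ring
          · have : 0 < (t ++ [c]).count old := List.count_pos_iff.mpr hin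
            omega
        · rw [if_pos (by exact_mod_cast List.count_eq_zero.mpr hin), if_neg hin]
          push_cast; ring
      simp only [hD]
      rw [hwdrop]
      simp only [setOfList_length_eq_card]
      by_cases hret : (((t ++ [c]).toFinset.card : Nat) : Int) = (L' : Int)
      · rw [if_pos hret, if_pos hret]
      · rw [if_neg hret, if_neg hret]
        -- recursive step with pre' = pre ++ [c]
        have hpre' : (pre ++ [c]).drop ((pre ++ [c]).length - L') = t ++ [c] := by
          rw [List.length_append, List.length_singleton, htdef]
          have h1 : k + 1 - L' = (k - L') + 1 := by omega
          rw [hk] at h1 ⊢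
          rw [h1, List.drop_append_of_le_length (by omega)]
        have := ih (pre ++ [c]) ((counts.insert c (counts.getD c 0 + 1)).insert old
            ((counts.insert c (counts.getD c 0 + 1)).getD old 0 - 1))
            (((t ++ [c]).toFinset.card : Nat) : Int)
            (by rw [hs, List.append_assoc]; rfl)
            (by intro x; rw [hpre', hc2 x])
            (by rw [hpre'])
        rw [hpre'] at this
        have hlen' : ((pre ++ [c]).length : Int) = (k : Int) + 1 := by
          rw [List.length_append, List.length_singleton]; push_cast; ring
        rw [hlen'] at this
        exact this
    · -- growing case: window shorter than L', no pop / no removal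
      rw [Nat.not_le] at hcase
      have hw_pre : w = pre := by rw [hwdef, Nat.sub_eq_zero_of_le (le_of_lt hcase), List.drop_zero]
      have hwl : w.length = k := by rw [hw_pre, hk]
      -- A does not pop
      rw [if_neg (by rw [hwl]; exact_mod_cast Nat.ne_of_lt hcase : ¬ ((w.length : Nat) : Int) = (L' : Int))]
      -- B does not remove
      rw [if_neg (by exact_mod_cast Nat.not_le.mpr hcase : ¬ ((L' : Nat) : Int) ≤ (k : Int))]
      rw [hd1]
      rw [setOfList_length_eq_card]
      by_cases hret : (((w ++ [c]).toFinset.card : Nat) : Int) = (L' : Int)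
      · rw [if_pos hret, if_pos hret]
      · rw [if_neg hret, if_neg hret]
        have hpre' : (pre ++ [c]).drop ((pre ++ [c]).length - L') = w ++ [c] := by
          rw [List.length_append, List.length_singleton, hw_pre,
            Nat.sub_eq_zero_of_le (by omega), List.drop_zero]
        have := ih (pre ++ [c]) (counts.insert c (counts.getD c 0 + 1))
            (((w ++ [c]).toFinset.card : Nat) : Int)
            (by rw [hs, List.append_assoc]; rfl)
            (by intro x; rw [hpre', hc1 x])
            (by rw [hpre'])
        rw [hpre'] at this
        have hlen' : ((pre ++ [c]).length : Int) = (k : Int) + 1 := by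
          rw [List.length_append, List.length_singleton]; push_cast; ring
        rw [hlen'] at this
        exact this

-- ===== VERDICT (by name: the statement is the Claim_ definition above) =====
theorem marker_pos_spec : Claim_equal_marker_pos := by
  intro signal L _ hpre
  unfold Spec_marker_pos marker_pos marker_pos_alt
  rcases lt_trichotomy L 0 with h | h | h
  · rw [goA_neg L h, if_pos (le_of_lt h)]
  · subst h
    rcases hpre with h0 | h0
    · exact absurd rfl h0
    · subst h0; simp [markerGoA]
  · rw [if_neg (by omega)]
    obtain ⟨L', rfl⟩ : ∃ n : Nat, L = (n : Int) := ⟨L.toNat, (Int.toNat_of_nonneg h.le).symm⟩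
    have hL' : 0 < L' := by exact_mod_cast h
    have := go_eq signal.toList L' hL' signal.toList [] PySem.Dict.empty 0
      (by simp) (by intro x; simp [PySem.Dict.getD, PySem.Dict.get?, PySem.Dict.empty]) (by simp)
    simpa using this
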